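-- pv_equiv track=rewrite | github.com/abbdaveck/project-birds | birds3.0.py | limit_bird_movements_list
-- ===== SOURCE A (Python) =====
-- def limit_bird_movements_list(data, max_per_minute=8):
--     """
--     Läser näst data från lista och kollar om antalet passeringar har ändrat sig mer än +8 från föregående tillfälle
--
--     :param data: lista med datan som ska korriigeras
--     :type data: str
--     :param max_per_minutes: max antalet inpasseringa som får lov att göras def 4
--     :type max_per_minute: int
--     """
--
--     limited = []
--
--     prev_count = data[0][1] # hela listan men vi väljer nu specifict första raden andra elementet = count
--     running_total = prev_count
--
--     for i, (dt, count) in enumerate(data):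
--         if i == 0:
--             limited.append((dt, count))
--             continue
--
--         delta = count - prev_count   #71 - 70 = 1
--
--         delta = max(0, min(delta, max_per_minute)) # max av ( 0 eller minsta av ( 1 eller 4) )
--
--         running_total += delta # föregående värde = föregående värde + delta  "" nuvarande plats = 70 + 1
--         limited.append((dt, running_total))
--         prev_count = count
--
--     return limited
-- ===== SOURCE B (Python) =====
-- def limit_bird_movements_list(data, max_per_minute=8):
--     # Two-pass: clamp consecutive deltas first, then prefix-sum them from the
--     # first count, then pair the totals back with the datetimes.
--     deltas = [max(0, min(c2 - c1, max_per_minute))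
--               for (_, c1), (_, c2) in zip(data, data[1:])]
--     totals = [data[0][1]]
--     for d in deltas:
--         totals.append(totals[-1] + d)
--     return [(dt, t) for (dt, _), t in zip(data, totals)]
-- ===== Notes on version B (the rewrite author's own statement) =====
-- stated objective: simpler
-- what changed: Replaces the single stateful loop (prev_count/running_total/index check) by a two-pass pipeline: a zip-with-tail pass computing the clamped deltas, then a prefix-sum pass producing the totals, zipped back with the datetimes.
import Mathlib
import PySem

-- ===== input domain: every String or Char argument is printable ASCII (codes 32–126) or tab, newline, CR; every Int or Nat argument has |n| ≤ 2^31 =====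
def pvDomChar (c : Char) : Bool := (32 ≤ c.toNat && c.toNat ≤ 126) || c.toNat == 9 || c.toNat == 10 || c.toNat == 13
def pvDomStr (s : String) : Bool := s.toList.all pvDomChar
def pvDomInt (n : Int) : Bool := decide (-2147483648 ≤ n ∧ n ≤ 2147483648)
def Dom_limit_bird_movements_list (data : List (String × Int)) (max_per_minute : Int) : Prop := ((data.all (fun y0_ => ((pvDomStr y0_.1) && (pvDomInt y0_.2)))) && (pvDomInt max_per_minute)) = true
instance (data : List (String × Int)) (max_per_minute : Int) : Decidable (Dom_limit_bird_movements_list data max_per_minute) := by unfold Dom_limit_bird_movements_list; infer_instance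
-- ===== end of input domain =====

-- B replaces A's single stateful loop by a two-pass pipeline (clamped deltas, then prefix sums); simpler decomposition, same cost.

-- ===== PORT A =====
-- A's for-loop after the i == 0 iteration: state is (prev_count, running_total).
def pvALoop (rest : List (String × Int)) (prev_count running_total : Int)
    (max_per_minute : Int) : List (String × Int) :=
  match rest with
  | [] => []
  | (dt, count) :: rest' =>
      let delta := count - prev_count
      let delta := max 0 (min delta max_per_minute)
      let running_total := running_total + delta
      (dt, running_total) :: pvALoop rest' count running_total max_per_minute

def limit_bird_movements_list (data : List (String × Int)) (max_per_minute : Int) : List (String × Int) :=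
  match data with
  | [] => []  -- data[0][1] raises IndexError in Python; excluded by Pre_
  | (dt0, c0) :: rest => (dt0, c0) :: pvALoop rest c0 c0 max_per_minute

-- ===== PORT B =====
def limit_bird_movements_list_alt (data : List (String × Int)) (max_per_minute : Int) : List (String × Int) :=
  match data with
  | [] => []  -- data[0][1] raises IndexError in Python; excluded by Pre_
  | (_, c0) :: _ =>
      let deltas := (List.zip data data.tail).map
        (fun p => max 0 (min (p.2.2 - p.1.2) max_per_minute))
      let totals := List.scanl (· + ·) c0 deltas
      List.zip (data.map Prod.fst) totals

-- ===== PRECONDITION & SPEC =====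
-- Pre_ excludes the empty list, on which A raises IndexError (data[0][1]).
def Pre_limit_bird_movements_list (data : List (String × Int)) (max_per_minute : Int) : Prop := data ≠ []
instance (data : List (String × Int)) (max_per_minute : Int) : Decidable (Pre_limit_bird_movements_list data max_per_minute) := by unfold Pre_limit_bird_movements_list; infer_instance
def pvWitness_limit_bird_movements_list : (List (String × Int)) × Int := ([("2024-01-01 10:00", 70), ("2024-01-01 10:01", 75)], 8)

def Spec_limit_bird_movements_list (data : List (String × Int)) (max_per_minute : Int) (out : List (String × Int)) : Prop := out = limit_bird_movements_list_alt data max_per_minute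
instance (data : List (String × Int)) (max_per_minute : Int) (out : List (String × Int)) : Decidable (Spec_limit_bird_movements_list data max_per_minute out) := by unfold Spec_limit_bird_movements_list; infer_instance

-- ===== CLAIM (what is proved, stated in full; the proofs are below) =====
def Claim_equal_limit_bird_movements_list : Prop := ∀ (data : List (String × Int)) (max_per_minute : Int), Dom_limit_bird_movements_list data max_per_minute → Pre_limit_bird_movements_list data max_per_minute → Spec_limit_bird_movements_list data max_per_minute (limit_bird_movements_list data max_per_minute)

-- ===== LEMMAS AND PROOFS =====

-- The clamped-delta list of consecutive pairs, in recursive form.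
def pvDeltas (prev : Int) (rest : List (String × Int)) (m : Int) : List Int :=
  match rest with
  | [] => []
  | (_, c) :: rest' => max 0 (min (c - prev) m) :: pvDeltas c rest' m

theorem pvDeltas_eq_zipMap (prev : Int) (dt : String) (rest : List (String × Int)) (m : Int) :
    (List.zip ((dt, prev) :: rest) rest).map
      (fun p => max 0 (min (p.2.2 - p.1.2) m)) = pvDeltas prev rest m := by
  induction rest generalizing prev dt with
  | nil => rfl
  | cons hd tl ih =>
      obtain ⟨dt', c⟩ := hd
      simp only [pvDeltas]
      rw [← ih c dt']
      simp [List.zip]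

theorem pvScanl_cons_tail (b : Int) (l : List Int) :
    List.scanl (· + ·) b l = b :: (List.scanl (· + ·) b l).tail := by
  cases l <;> simp [List.scanl_nil, List.scanl_cons]

theorem pvALoop_eq (rest : List (String × Int)) (prev total m : Int) :
    pvALoop rest prev total m =
      List.zip (rest.map Prod.fst) ((List.scanl (· + ·) total (pvDeltas prev rest m)).tail) := by
  induction rest generalizing prev total with
  | nil => rfl
  | cons hd tl ih =>
      obtain ⟨dt, c⟩ := hd
      simp only [pvALoop, pvDeltas, List.scanl_cons, List.map, List.tail_cons]
      rw [pvScanl_cons_tail (total + max 0 (min (c - prev) m)) (pvDeltas c tl m)]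
      simp [List.zip, ih]

-- ===== VERDICT (by name: the statement is the Claim_ definition above) =====
theorem limit_bird_movements_list_spec : Claim_equal_limit_bird_movements_list := by
  intro data m _ hpre
  unfold Spec_limit_bird_movements_list
  cases data with
  | nil => exact absurd rfl hpre
  | cons hd rest =>
      obtain ⟨dt0, c0⟩ := hd
      simp only [limit_bird_movements_list, limit_bird_movements_list_alt, List.tail]
      rw [pvDeltas_eq_zipMap c0 dt0 rest m, pvALoop_eq,
          pvScanl_cons_tail c0 (pvDeltas c0 rest m)]
      simp [List.zip]
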